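-- pv_equiv track=rewrite | github.com/Galahad3x/AdventOfCode2019 | day6/day6.py | calculate_orbits
-- ===== SOURCE A (Python) =====
-- def calculate_orbits(orbit_dic, key):
--     if key in orbit_dic:
--         if orbit_dic[key] == "COM":
--             return 1
--         else:
--             return 1 + calculate_orbits(orbit_dic, orbit_dic[key])
--     else:
--         return 0
-- ===== SOURCE B (Python) =====
-- def calculate_orbits(orbit_dic, key):
--     # Bottom-up dynamic programming with a shrinking worklist: resolve the depth
--     # of every key at once (stopping as soon as a pass resolves nothing), then
--     # answer the query with a single table lookup.
--     depth = {}
--     pending = list(orbit_dic)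
--     for _ in range(len(orbit_dic)):
--         still = []
--         for k in pending:
--             p = orbit_dic[k]
--             if p == "COM" or p not in orbit_dic:
--                 depth[k] = 1
--             elif p in depth:
--                 depth[k] = depth[p] + 1
--             else:
--                 still.append(k)
--         if len(still) == len(pending):
--             break
--         pending = still
--     return depth.get(key, 0)
-- ===== Notes on version B (the rewrite author's own statement) =====
-- stated objective: alternative
-- what changed: Replaces A's top-down recursion along one parent chain with a bottom-up dynamic-programming pass: a worklist of unresolved keys is swept repeatedly (stopping when a sweep resolves nothing), filling a depth memo table for every key at once, and the query is answered by a single table lookup.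
import Mathlib
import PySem

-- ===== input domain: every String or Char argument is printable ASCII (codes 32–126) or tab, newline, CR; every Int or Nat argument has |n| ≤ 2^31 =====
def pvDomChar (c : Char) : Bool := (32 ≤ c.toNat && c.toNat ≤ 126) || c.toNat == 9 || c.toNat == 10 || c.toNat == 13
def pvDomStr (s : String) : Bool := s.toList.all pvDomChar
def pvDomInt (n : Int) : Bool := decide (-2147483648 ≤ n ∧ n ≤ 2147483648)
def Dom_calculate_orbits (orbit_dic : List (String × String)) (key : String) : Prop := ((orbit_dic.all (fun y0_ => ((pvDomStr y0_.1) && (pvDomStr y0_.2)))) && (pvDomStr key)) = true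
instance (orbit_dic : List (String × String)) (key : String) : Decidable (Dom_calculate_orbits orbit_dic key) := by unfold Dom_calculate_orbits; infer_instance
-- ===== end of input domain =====

-- ===== PORT A =====
-- B replaces A's top-down recursion along one chain with a bottom-up DP table over all keys.
-- Port of A: the Python recursion is ported with fuel dic.length + 1, which suffices whenever the
-- Python recursion terminates (a terminating chain never revisits a key).  'key in orbit_dic' /
-- 'orbit_dic[key]' = first-match lookup on the association list (List.lookup).
def pvCalcA : Nat → List (String × String) → String → Int
  | 0, _, _ => 0
  | fuel+1, dic, key =>
    match List.lookup key dic with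
    | some v => if v = "COM" then 1 else 1 + pvCalcA fuel dic v
    | none => 0

def calculate_orbits (orbit_dic : List (String × String)) (key : String) : Int :=
  pvCalcA (orbit_dic.length + 1) orbit_dic key

-- ===== PORT B =====
-- Port of Source B.  The memo dict 'depth' is an association list built strictly by appending absent
-- keys, so insertion order and first-match lookup are exactly Python's dict; 'pending' starts as
-- list(orbit_dic) = the key list dic.map Prod.fst ('orbit_dic[k]' = List.lookup; Python dict keys
-- are distinct, so that key list is exact).  pvVisitB is the body of 'for k in pending' acting on
-- the pair (depth, still); pvPassB is one inner pass (still starts empty); pvRunB is the outer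
-- 'for _ in range(len(orbit_dic))' with its early 'break' when the pass resolved nothing
-- (len(still) == len(pending)).
def pvVisitB (dic : List (String × String)) (acc : List (String × Int) × List String)
    (k : String) : List (String × Int) × List String :=
  match List.lookup k dic with
  | none => acc  -- unreachable: pending only ever holds keys of dic, Python's orbit_dic[k] never raises
  | some p =>
    if p = "COM" ∨ List.lookup p dic = none then (acc.1 ++ [(k, 1)], acc.2)
    else
      match List.lookup p acc.1 with
      | some v => (acc.1 ++ [(k, v + 1)], acc.2)
      | none => (acc.1, acc.2 ++ [k])

def pvPassB (dic : List (String × String)) (st : List (String × Int) × List String) :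
    List (String × Int) × List String :=
  st.2.foldl (pvVisitB dic) (st.1, [])

def pvRunB (dic : List (String × String)) : Nat → List (String × Int) × List String → List (String × Int)
  | 0, st => st.1
  | n+1, st =>
    if (pvPassB dic st).2.length = st.2.length then (pvPassB dic st).1
    else pvRunB dic n (pvPassB dic st)

def calculate_orbits_alt (orbit_dic : List (String × String)) (key : String) : Int :=
  (List.lookup key (pvRunB orbit_dic orbit_dic.length ([], orbit_dic.map Prod.fst))).getD 0

-- ===== PRECONDITION & SPEC =====
-- Bottom-up closure of the keys whose parent chain terminates: a key is safe if its parent is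
-- "COM", is not a key, or is already known safe; iterated |dic| times this reaches the fixpoint.
def pvSafeStep (dic : List (String × String)) (s : List String) : List String :=
  (dic.map Prod.fst).filter (fun k =>
    match List.lookup k dic with
    | some v => v == "COM" || (List.lookup v dic).isNone || s.contains v
    | none => true)

def pvSafeKeys (dic : List (String × String)) : List String :=
  Nat.iterate (pvSafeStep dic) dic.length []

-- Pre_ excludes exactly the cyclic parent chains, on which the Python A never returns
-- (it raises RecursionError); A returns normally on every input admitted here.
def Pre_calculate_orbits (orbit_dic : List (String × String)) (key : String) : Prop :=
  (List.lookup key orbit_dic).isNone ∨ key ∈ pvSafeKeys orbit_dic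

instance (orbit_dic : List (String × String)) (key : String) : Decidable (Pre_calculate_orbits orbit_dic key) := by
  unfold Pre_calculate_orbits; infer_instance

def pvWitness_calculate_orbits : (List (String × String)) × String :=
  ([("B", "A"), ("A", "COM")], "B")

def Spec_calculate_orbits (orbit_dic : List (String × String)) (key : String) (out : Int) : Prop := out = calculate_orbits_alt orbit_dic key
instance (orbit_dic : List (String × String)) (key : String) (out : Int) : Decidable (Spec_calculate_orbits orbit_dic key out) := by unfold Spec_calculate_orbits; infer_instance

-- ===== CLAIM (what is proved, stated in full; the proofs are below) =====
def Claim_equal_calculate_orbits : Prop := ∀ (orbit_dic : List (String × String)) (key : String), Dom_calculate_orbits orbit_dic key → Pre_calculate_orbits orbit_dic key → Spec_calculate_orbits orbit_dic key (calculate_orbits orbit_dic key)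

-- ===== LEMMAS AND PROOFS =====

theorem pvLookup_none_not_mem {β : Type} {d : List (String × β)} {k : String}
    (h : List.lookup k d = none) : k ∉ d.map Prod.fst := by
  rw [List.lookup_eq_none_iff] at h
  simp only [List.mem_map]
  rintro ⟨p, hp, rfl⟩
  simpa using h p hp

theorem pvLookup_append_self_isSome (d : List (String × Int)) (x : String) (w : Int) :
    (List.lookup x (d ++ [(x, w)])).isSome := by
  rw [List.lookup_append]
  cases hl : List.lookup x d with
  | some v => rfl
  | none => simp [List.lookup]

-- the three equations of pvVisitB
theorem pvVisitB_none {dic : List (String × String)} (acc : List (String × Int) × List String)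
    {k : String} (h : List.lookup k dic = none) : pvVisitB dic acc k = acc := by
  simp [pvVisitB, h]

theorem pvVisitB_base {dic : List (String × String)} (acc : List (String × Int) × List String)
    {k p : String} (h : List.lookup k dic = some p)
    (hb : p = "COM" ∨ List.lookup p dic = none) :
    pvVisitB dic acc k = (acc.1 ++ [(k, 1)], acc.2) := by
  simp only [pvVisitB, h]
  rw [if_pos hb]

theorem pvVisitB_step {dic : List (String × String)} (acc : List (String × Int) × List String)
    {k p : String} {v : Int} (h : List.lookup k dic = some p)
    (hb : ¬(p = "COM" ∨ List.lookup p dic = none)) (hp : List.lookup p acc.1 = some v) :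
    pvVisitB dic acc k = (acc.1 ++ [(k, v + 1)], acc.2) := by
  simp only [pvVisitB, h]
  rw [if_neg hb, hp]

theorem pvVisitB_wait {dic : List (String × String)} (acc : List (String × Int) × List String)
    {k p : String} (h : List.lookup k dic = some p)
    (hb : ¬(p = "COM" ∨ List.lookup p dic = none)) (hp : List.lookup p acc.1 = none) :
    pvVisitB dic acc k = (acc.1, acc.2 ++ [k]) := by
  simp only [pvVisitB, h]
  rw [if_neg hb, hp]

-- each visit either keeps the state, appends one table entry, or appends k to still
theorem pvVisitB_cases (dic : List (String × String)) (acc : List (String × Int) × List String)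
    (k : String) :
    pvVisitB dic acc k = acc ∨
    (∃ w, pvVisitB dic acc k = (acc.1 ++ [(k, w)], acc.2)) ∨
    pvVisitB dic acc k = (acc.1, acc.2 ++ [k]) := by
  cases h : List.lookup k dic with
  | none => exact Or.inl (pvVisitB_none acc h)
  | some p =>
    by_cases hb : p = "COM" ∨ List.lookup p dic = none
    · exact Or.inr (Or.inl ⟨1, pvVisitB_base acc h hb⟩)
    · cases hp : List.lookup p acc.1 with
      | some v => exact Or.inr (Or.inl ⟨v + 1, pvVisitB_step acc h hb hp⟩)
      | none => exact Or.inr (Or.inr (pvVisitB_wait acc h hb hp))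

-- table entries and still-membership survive a visit and a fold
theorem pvVisitB_fst_mono (dic : List (String × String)) (acc : List (String × Int) × List String)
    (x : String) {k : String} {v : Int} (h : List.lookup k acc.1 = some v) :
    List.lookup k (pvVisitB dic acc x).1 = some v := by
  rcases pvVisitB_cases dic acc x with hc | ⟨w, hc⟩ | hc <;> rw [hc] <;>
    simp [List.lookup_append, h]

theorem pvVisitB_snd_mono (dic : List (String × String)) (acc : List (String × Int) × List String)
    (x : String) {k : String} (h : k ∈ acc.2) : k ∈ (pvVisitB dic acc x).2 := by
  rcases pvVisitB_cases dic acc x with hc | ⟨w, hc⟩ | hc <;> rw [hc] <;> simp [h]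

theorem pvFoldB_fst_mono (dic : List (String × String)) :
    ∀ (pend : List String) (acc : List (String × Int) × List String) {k : String} {v : Int},
      List.lookup k acc.1 = some v →
      List.lookup k (pend.foldl (pvVisitB dic) acc).1 = some v := by
  intro pend
  induction pend with
  | nil => intro acc k v h; simpa using h
  | cons x pend ih => intro acc k v h; exact ih _ (pvVisitB_fst_mono dic acc x h)

theorem pvFoldB_isSome_mono (dic : List (String × String)) (pend : List String)
    (acc : List (String × Int) × List String) {k : String}
    (h : (List.lookup k acc.1).isSome) :
    (List.lookup k (pend.foldl (pvVisitB dic) acc).1).isSome := by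
  cases hl : List.lookup k acc.1 with
  | none => rw [hl] at h; simp at h
  | some v => simp [pvFoldB_fst_mono dic pend acc hl]

-- lengths never shrink along the fold
theorem pvFoldB_len_ge (dic : List (String × String)) :
    ∀ (pend : List String) (acc : List (String × Int) × List String),
      acc.1.length ≤ (pend.foldl (pvVisitB dic) acc).1.length ∧
      acc.2.length ≤ (pend.foldl (pvVisitB dic) acc).2.length := by
  intro pend
  induction pend with
  | nil => intro acc; simp
  | cons x pend ih =>
    intro acc
    obtain ⟨h1, h2⟩ := ih (pvVisitB dic acc x)
    rcases pvVisitB_cases dic acc x with hc | ⟨w, hc⟩ | hc <;> rw [hc] at h1 h2 <;>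
      simp only [List.foldl_cons, hc, List.length_append, List.length_cons,
        List.length_nil] at h1 h2 ⊢ <;> omega

-- counting: the fold adds at most one table entry or still entry per pending key, and a pass
-- whose still list is as long as pending changed nothing at all
theorem pvFoldB_count (dic : List (String × String)) :
    ∀ (pend : List String) (acc : List (String × Int) × List String),
      ((pend.foldl (pvVisitB dic) acc).1.length + (pend.foldl (pvVisitB dic) acc).2.length
         ≤ acc.1.length + acc.2.length + pend.length) ∧
      ((pend.foldl (pvVisitB dic) acc).2.length = acc.2.length + pend.length →
         pend.foldl (pvVisitB dic) acc = (acc.1, acc.2 ++ pend)) := by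
  intro pend
  induction pend with
  | nil => intro acc; exact ⟨by simp, by intro _; simp⟩
  | cons x pend ih =>
    intro acc
    obtain ⟨hb, he⟩ := ih (pvVisitB dic acc x)
    obtain ⟨hg1, hg2⟩ := pvFoldB_len_ge dic pend (pvVisitB dic acc x)
    rcases pvVisitB_cases dic acc x with hc | ⟨w, hc⟩ | hc <;>
      simp only [List.foldl_cons, hc] at hb he hg1 hg2 ⊢
    · refine ⟨by simp at hb ⊢; omega, ?_⟩
      intro hlen
      simp only [List.length_cons] at hlen
      omega
    · refine ⟨by simp at hb ⊢; omega, ?_⟩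
      intro hlen
      simp only [List.length_cons] at hlen
      simp at hb hg1
      omega
    · refine ⟨by simp at hb ⊢; omega, ?_⟩
      intro hlen
      have : (pend.foldl (pvVisitB dic) (acc.1, acc.2 ++ [x])).2.length
          = (acc.2 ++ [x]).length + pend.length := by simp at hlen ⊢; omega
      rw [he this, List.append_assoc, List.singleton_append]

theorem pvPassB_fix (dic : List (String × String)) (st : List (String × Int) × List String)
    (h : (pvPassB dic st).2.length = st.2.length) : pvPassB dic st = st := by
  have := (pvFoldB_count dic st.2 (st.1, [])).2
  unfold pvPassB at h ⊢
  rw [this (by simpa using h)]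
  simp

-- the soundness invariant of the table: every stored value v satisfies 1 ≤ v ≤ |table| and is
-- THE value of A's recursion at any fuel ≥ v
def pvInvA (dic : List (String × String)) (d : List (String × Int)) : Prop :=
  ∀ k v, List.lookup k d = some v →
    1 ≤ v ∧ v ≤ (d.length : Int) ∧ ∀ f : Nat, v ≤ (f : Int) → pvCalcA f dic k = v

theorem pvCalcA_none {dic : List (String × String)} {k : String}
    (h : List.lookup k dic = none) : ∀ f, pvCalcA f dic k = 0 := by
  intro f; cases f <;> simp [pvCalcA, h]

theorem pvCalcA_base {dic : List (String × String)} {k p : String}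
    (h : List.lookup k dic = some p) (hp : p = "COM" ∨ List.lookup p dic = none) :
    ∀ f : Nat, (1:Int) ≤ f → pvCalcA f dic k = 1 := by
  intro f hf
  cases f with
  | zero => simp at hf
  | succ n =>
    rcases hp with hp | hp
    · simp [pvCalcA, h, hp]
    · by_cases hc : p = "COM"
      · simp [pvCalcA, h, hc]
      · simp [pvCalcA, h, hc, pvCalcA_none hp]

theorem pvCalcA_step {dic : List (String × String)} {k p : String} {v : Int}
    (h : List.lookup k dic = some p) (hc : p ≠ "COM") (h1 : 1 ≤ v)
    (hv : ∀ f : Nat, v ≤ (f : Int) → pvCalcA f dic p = v) :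
    ∀ f : Nat, v + 1 ≤ (f : Int) → pvCalcA f dic k = v + 1 := by
  intro f hf
  cases f with
  | zero => simp at hf; omega
  | succ n =>
    have : v ≤ (n : Int) := by push_cast at hf ⊢; omega
    simp [pvCalcA, h, hc, hv n this]
    ring

theorem pvInvA_append {dic : List (String × String)} {d : List (String × Int)} {x : String}
    {w : Int} (hInv : pvInvA dic d) (hw1 : 1 ≤ w) (hwlen : w ≤ (d.length : Int) + 1)
    (hwf : ∀ f : Nat, w ≤ (f : Int) → pvCalcA f dic x = w) :
    pvInvA dic (d ++ [(x, w)]) := by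
  intro k v hkv
  rw [List.lookup_append] at hkv
  cases hl : List.lookup k d with
  | some u =>
    rw [hl] at hkv; simp at hkv; subst hkv
    obtain ⟨h1, h2, h3⟩ := hInv k u hl
    refine ⟨h1, ?_, h3⟩
    simp only [List.length_append, List.length_cons, List.length_nil]
    push_cast; omega
  | none =>
    rw [hl, Option.none_or] at hkv
    by_cases hkx : k = x
    · subst hkx
      have hb : (k == k) = true := by simp
      simp only [List.lookup, hb] at hkv
      obtain rfl : w = v := by simpa using hkv
      refine ⟨hw1, ?_, hwf⟩
      simp only [List.length_append, List.length_cons, List.length_nil]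
      push_cast; omega
    · have hb : (k == x) = false := by simpa using hkx
      simp only [List.lookup, hb] at hkv
      simp at hkv

theorem pvVisitB_invA (dic : List (String × String)) (acc : List (String × Int) × List String)
    (x : String) (h : pvInvA dic acc.1) : pvInvA dic (pvVisitB dic acc x).1 := by
  cases hx : List.lookup x dic with
  | none => rw [pvVisitB_none acc hx]; exact h
  | some p =>
    by_cases hb : p = "COM" ∨ List.lookup p dic = none
    · rw [pvVisitB_base acc hx hb]
      exact pvInvA_append h (le_refl _) (by omega) (pvCalcA_base hx hb)
    · cases hp : List.lookup p acc.1 with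
      | none => rw [pvVisitB_wait acc hx hb hp]; exact h
      | some v =>
        rw [pvVisitB_step acc hx hb hp]
        obtain ⟨h1, h2, h3⟩ := h p v hp
        have hcne : p ≠ "COM" := fun hc => hb (Or.inl hc)
        exact pvInvA_append h (by omega) (by omega) (pvCalcA_step hx hcne h1 h3)

theorem pvFoldB_invA (dic : List (String × String)) :
    ∀ (pend : List String) (acc : List (String × Int) × List String),
      pvInvA dic acc.1 → pvInvA dic (pend.foldl (pvVisitB dic) acc).1 := by
  intro pend
  induction pend with
  | nil => intro acc h; simpa using h
  | cons x pend ih => intro acc h; exact ih _ (pvVisitB_invA dic acc x h)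

-- every key of dic is, at all times, either resolved in the table or still pending
def pvInvD (dic : List (String × String)) (st : List (String × Int) × List String) : Prop :=
  ∀ k ∈ dic.map Prod.fst, (List.lookup k st.1).isSome ∨ k ∈ st.2

theorem pvFoldB_invD (dic : List (String × String)) :
    ∀ (pend : List String) (acc : List (String × Int) × List String) (k : String),
      k ∈ dic.map Prod.fst →
      ((List.lookup k acc.1).isSome ∨ k ∈ acc.2 ∨ k ∈ pend) →
      ((List.lookup k (pend.foldl (pvVisitB dic) acc).1).isSome ∨
        k ∈ (pend.foldl (pvVisitB dic) acc).2) := by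
  intro pend
  induction pend with
  | nil =>
    intro acc k _ h
    simpa using h.imp id (fun h' => h'.resolve_right (by simp))
  | cons x pend ih =>
    intro acc k hkdic h
    simp only [List.foldl_cons]
    apply ih (pvVisitB dic acc x) k hkdic
    rcases h with h | h | h
    · exact Or.inl (by cases hl : List.lookup k acc.1 with
        | none => rw [hl] at h; simp at h
        | some v => simp [pvVisitB_fst_mono dic acc x hl])
    · exact Or.inr (Or.inl (pvVisitB_snd_mono dic acc x h))
    · rcases List.mem_cons.mp h with rfl | h'
      · -- k is the key being visited: it is either resolved now or appended to still
        cases hx : List.lookup k dic with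
        | none => exact absurd hkdic (pvLookup_none_not_mem hx)
        | some p =>
          by_cases hb : p = "COM" ∨ List.lookup p dic = none
          · rw [pvVisitB_base acc hx hb]
            exact Or.inl (pvLookup_append_self_isSome acc.1 k 1)
          · cases hp : List.lookup p acc.1 with
            | none => rw [pvVisitB_wait acc hx hb hp]; exact Or.inr (Or.inl (by simp))
            | some v =>
              rw [pvVisitB_step acc hx hb hp]
              exact Or.inl (pvLookup_append_self_isSome acc.1 k (v + 1))
      · exact Or.inr (Or.inr h')

-- completeness: a pending key whose parent is terminal or already resolved gets resolved
theorem pvFoldB_complete (dic : List (String × String)) :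
    ∀ (pend : List String) (acc : List (String × Int) × List String) (k p : String),
      k ∈ pend → List.lookup k dic = some p →
      (p = "COM" ∨ List.lookup p dic = none ∨ (List.lookup p acc.1).isSome) →
      (List.lookup k (pend.foldl (pvVisitB dic) acc).1).isSome := by
  intro pend
  induction pend with
  | nil => intro acc k p h; simp at h
  | cons x pend ih =>
    intro acc k p hk hdic hcond
    simp only [List.foldl_cons]
    by_cases hxk : x = k
    · subst hxk
      by_cases hb : p = "COM" ∨ List.lookup p dic = none
      · rw [pvVisitB_base acc hdic hb]
        exact pvFoldB_isSome_mono dic pend _ (pvLookup_append_self_isSome acc.1 x 1)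
      · have hres : (List.lookup p acc.1).isSome := by
          rcases hcond with hc | hc | hc
          · exact absurd (Or.inl hc) hb
          · exact absurd (Or.inr hc) hb
          · exact hc
        cases hp : List.lookup p acc.1 with
        | none => rw [hp] at hres; simp at hres
        | some v =>
          rw [pvVisitB_step acc hdic hb hp]
          exact pvFoldB_isSome_mono dic pend _ (pvLookup_append_self_isSome acc.1 x (v + 1))
    · have hk' : k ∈ pend := by
        rcases List.mem_cons.mp hk with h | h
        · exact absurd h.symm hxk
        · exact h
      apply ih _ k p hk' hdic
      rcases hcond with hc | hc | hc
      · exact Or.inl hc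
      · exact Or.inr (Or.inl hc)
      · cases hp : List.lookup p acc.1 with
        | none => rw [hp] at hc; simp at hc
        | some v => exact Or.inr (Or.inr (by simp [pvVisitB_fst_mono dic acc x hp]))

-- one pass resolves every key of the safe-step of an already-resolved set
theorem pvStepRes (dic : List (String × String)) (st : List (String × Int) × List String)
    (hInvD : pvInvD dic st) (s : List String)
    (hs : ∀ k ∈ s, (List.lookup k st.1).isSome) :
    ∀ k ∈ pvSafeStep dic s, (List.lookup k (pvPassB dic st).1).isSome := by
  intro k hk
  unfold pvSafeStep at hk
  rw [List.mem_filter] at hk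
  obtain ⟨hmem, hcond⟩ := hk
  cases hdic : List.lookup k dic with
  | none => exact absurd hmem (pvLookup_none_not_mem hdic)
  | some p =>
    rw [hdic] at hcond
    simp only [Bool.or_eq_true, beq_iff_eq, Option.isNone_iff_eq_none, List.contains_eq_mem,
      decide_eq_true_eq] at hcond
    have hcond' : p = "COM" ∨ List.lookup p dic = none ∨ (List.lookup p st.1).isSome := by
      rcases hcond with (hc | hc) | hc
      · exact Or.inl hc
      · exact Or.inr (Or.inl hc)
      · exact Or.inr (Or.inr (hs p hc))
    rcases hInvD k hmem with hres | hpend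
    · exact pvFoldB_isSome_mono dic st.2 (st.1, []) hres
    · exact pvFoldB_complete dic st.2 (st.1, []) k p hpend hdic hcond'

-- at a fixpoint of the pass, the whole safe closure is already resolved
theorem pvEfix (dic : List (String × String)) (st : List (String × Int) × List String)
    (hfix : pvPassB dic st = st) (hInvD : pvInvD dic st) :
    ∀ (j : Nat) (s : List String), (∀ k ∈ s, (List.lookup k st.1).isSome) →
      ∀ k ∈ Nat.iterate (pvSafeStep dic) j s, (List.lookup k st.1).isSome := by
  intro j
  induction j with
  | zero => intro s hs k hk; exact hs k (by simpa using hk)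
  | succ n ih =>
    intro s hs k hk
    rw [Function.iterate_succ_apply] at hk
    refine ih (pvSafeStep dic s) ?_ k hk
    intro a ha
    have := pvStepRes dic st hInvD s hs a ha
    rwa [hfix] at this

-- everything pvRunB guarantees: the table is sound, not longer than dic, and resolves the
-- whole safe closure reachable with the available fuel
theorem pvRunB_main (dic : List (String × String)) :
    ∀ (fuel : Nat) (st : List (String × Int) × List String),
      pvInvA dic st.1 → st.1.length + st.2.length ≤ dic.length → pvInvD dic st →
      (pvInvA dic (pvRunB dic fuel st) ∧ (pvRunB dic fuel st).length ≤ dic.length) ∧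
      (∀ (s : List String), (∀ k ∈ s, (List.lookup k st.1).isSome) →
        ∀ k ∈ Nat.iterate (pvSafeStep dic) fuel s,
          (List.lookup k (pvRunB dic fuel st)).isSome) := by
  intro fuel
  induction fuel with
  | zero =>
    intro st hA hlen hD
    simp only [pvRunB]
    exact ⟨⟨hA, by omega⟩, fun s hs k hk => hs k (by simpa using hk)⟩
  | succ n ih =>
    intro st hA hlen hD
    simp only [pvRunB]
    by_cases hstop : (pvPassB dic st).2.length = st.2.length
    · rw [if_pos hstop]
      have hfix := pvPassB_fix dic st hstop
      rw [hfix]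
      exact ⟨⟨hA, by omega⟩, fun s hs k hk => pvEfix dic st hfix hD (n + 1) s hs k hk⟩
    · rw [if_neg hstop]
      have hA' : pvInvA dic (pvPassB dic st).1 := pvFoldB_invA dic st.2 (st.1, []) hA
      have hlen' : (pvPassB dic st).1.length + (pvPassB dic st).2.length ≤ dic.length := by
        have := (pvFoldB_count dic st.2 (st.1, [])).1
        unfold pvPassB
        simp at this
        omega
      have hD' : pvInvD dic (pvPassB dic st) := by
        intro k hk
        exact pvFoldB_invD dic st.2 (st.1, []) k hk
          (by rcases hD k hk with h | h
              · exact Or.inl h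
              · exact Or.inr (Or.inr h))
      refine ⟨(ih _ hA' hlen' hD').1, ?_⟩
      intro s hs k hk
      rw [Function.iterate_succ_apply] at hk
      exact (ih _ hA' hlen' hD').2 (pvSafeStep dic s) (pvStepRes dic st hD s hs) k hk

-- ===== VERDICT (by name: the statement is the Claim_ definition above) =====
theorem calculate_orbits_spec : Claim_equal_calculate_orbits := by
  intro dic key _ hpre
  unfold Spec_calculate_orbits calculate_orbits calculate_orbits_alt
  have hmain := pvRunB_main dic dic.length ([], dic.map Prod.fst)
    (by intro k v h; simp at h) (by simp) (fun k hk => Or.inr hk)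
  obtain ⟨⟨hA, hlen⟩, hres⟩ := hmain
  cases hk : List.lookup key (pvRunB dic dic.length ([], dic.map Prod.fst)) with
  | none =>
    -- key is not in the table; under Pre_ it cannot be safe, so A's recursion returns 0 too
    have hkd : List.lookup key dic = none := by
      rcases hpre with h | h
      · cases hl : List.lookup key dic with
        | none => rfl
        | some v => rw [hl] at h; simp at h
      · have := hres [] (by simp) key h
        rw [hk] at this; simp at this
    simp [pvCalcA_none hkd]
  | some v =>
    obtain ⟨h1, h2, h3⟩ := hA key v hk
    simp only [Option.getD_some]
    exact h3 (dic.length + 1) (by push_cast; omega)
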